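-- pv_equiv track=rewrite | github.com/gaboza12/we-are-algorithm | 724thomas/Week11 Graph Traversal/18513.py | solution
-- ===== SOURCE A (Python) =====
-- from collections import deque
--
-- def solution(n, m, arr):
--     queue = deque()
--     visited = set()
--     for n in arr:
--         queue.append((n, 0))
--         visited.add(n)
--
--     dir = [-1, 1]
--
--     ans = 0
--     while queue:
--         curr, cost = queue.popleft()
--         for x in dir:
--             if curr+x in visited or not m:
--                 continue
--             visited.add(curr+x)
--             queue.append((curr+x, cost + 1))
--             ans += cost+1
--             m -= 1
--     return ans
-- ===== SOURCE B (Python) =====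
-- def solution(n, m, arr):
--     # Closed form: sort the distinct sources, binary-search the freeze radius,
--     # then sum distances per gap arithmetically instead of cell-by-cell BFS.
--     s = sorted(set(arr))
--     if not s or m == 0:
--         return 0
--     diffs = [b - a for a, b in zip(s, s[1:])]
--
--     def cov(r):
--         # number of cells within distance r of some source
--         t = 2 * r + 1
--         for g in diffs:
--             t += min(g, 2 * r + 1)
--         return t
--
--     base = cov(0)
--
--     # least r with cov(r) - base >= m  (cov(m) - base >= 2*m >= m)
--     lo, hi = 0, m
--     while lo < hi:
--         mid = (lo + hi) // 2
--         if cov(mid) - base >= m: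
--             hi = mid
--         else:
--             lo = mid + 1
--     r = lo
--
--     def covsum(r):
--         # sum of cov(d) for d = 0 .. r-1, in closed form per gap
--         t = r * r
--         for g in diffs:
--             u = min(r - 1, (g - 1) // 2)
--             t += (u + 1) * (u + 1) + (r - 1 - u) * g
--         return t
--
--     total = r * cov(r) - covsum(r)  # sum of distances of all cells within radius r
--     return total - r * (cov(r) - base - m)
-- ===== Notes on version B (the rewrite author's own statement) =====
-- stated objective: alternative
-- what changed: Replaces the cell-by-cell multi-source BFS over the integer line with sorting the distinct sources, a closed-form per-gap count of covered cells per radius, a binary search for the radius at which m cells are reached, and an arithmetic (per-gap closed form) sum of distances.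
-- outside the precondition, e.g. on solution(0, -1, [5]): A does not finish within the time limit, B returns 0
import Mathlib
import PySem

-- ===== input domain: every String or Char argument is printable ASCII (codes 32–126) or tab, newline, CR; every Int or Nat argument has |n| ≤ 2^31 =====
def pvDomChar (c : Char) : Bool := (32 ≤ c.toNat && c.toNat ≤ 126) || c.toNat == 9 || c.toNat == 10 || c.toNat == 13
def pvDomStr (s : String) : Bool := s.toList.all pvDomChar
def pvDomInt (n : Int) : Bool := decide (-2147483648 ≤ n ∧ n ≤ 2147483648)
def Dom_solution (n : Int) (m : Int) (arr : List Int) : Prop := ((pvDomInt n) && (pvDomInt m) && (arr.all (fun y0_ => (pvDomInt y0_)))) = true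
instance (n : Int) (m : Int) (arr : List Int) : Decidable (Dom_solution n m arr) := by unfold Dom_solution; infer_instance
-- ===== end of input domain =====

-- B replaces the cell-by-cell multi-source BFS with sorting the distinct sources, per-gap
-- closed-form counting and a binary search for the stopping radius (objective: alternative).

-- ===== PORT A =====
-- the while loop of A; fuel bounds the number of iterations (queue length + 2*m suffices when 0 ≤ m)
-- visited is a Python set consulted only through membership; Std.HashSet is its exact
-- (order-irrelevant) model and keeps the port evaluable
def loopA : Nat → List (Int × Int) → Std.HashSet Int → Int → Int → Int
  | 0, _, _, _, ans => ans
  | _ + 1, [], _, _, ans => ans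
  | fuel + 1, (curr, cost) :: rest, visited, m, ans =>
    let st := [(-1 : Int), 1].foldl
      (fun (st : Std.HashSet Int × List (Int × Int) × Int × Int) x =>
        let (visited, queue, m, ans) := st
        if visited.contains (curr + x) || m == 0 then st
        else (visited.insert (curr + x), queue ++ [(curr + x, cost + 1)], m - 1, ans + (cost + 1)))
      (visited, rest, m, ans)
    loopA fuel st.2.1 st.1 st.2.2.1 st.2.2.2

def solution (n : Int) (m : Int) (arr : List Int) : Int :=
  let queue := arr.map (fun a => (a, (0 : Int)))
  let visited : Std.HashSet Int := arr.foldl (fun v a => v.insert a) ∅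
  loopA (arr.length + 2 * m.toNat + 1) queue visited m 0

-- ===== PORT B =====
-- gaps between consecutive sorted distinct sources ([b - a for a, b in zip(s, s[1:])])
def gapsB (s : List Int) : List Int := (s.zip s.tail).map (fun p => p.2 - p.1)

-- cov(r): number of cells within distance r of some source
def covB (diffs : List Int) (r : Int) : Int :=
  diffs.foldl (fun t g => t + min g (2 * r + 1)) (2 * r + 1)

-- the while-loop binary search (fuel = hi - lo at the first call)
def bsearchB (diffs : List Int) (base m : Int) : Nat → Int → Int → Int
  | 0, lo, _ => lo
  | fuel + 1, lo, hi =>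
    if lo < hi then
      let mid := PySem.Int.floordiv (lo + hi) 2
      if covB diffs mid - base ≥ m then bsearchB diffs base m fuel lo mid
      else bsearchB diffs base m fuel (mid + 1) hi
    else lo

-- covsum(r): sum of cov(d) for d = 0 .. r-1, closed form per gap
def covsumB (diffs : List Int) (r : Int) : Int :=
  diffs.foldl (fun t g =>
    let u := min (r - 1) (PySem.Int.floordiv (g - 1) 2)
    t + ((u + 1) * (u + 1) + (r - 1 - u) * g)) (r * r)

def solution_alt (n : Int) (m : Int) (arr : List Int) : Int :=
  let s := PySem.List.sorted (PySem.Set.ofList arr) (fun x => x) false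
  if s.isEmpty || m == 0 then 0
  else
    let diffs := gapsB s
    let base := covB diffs 0
    let r := bsearchB diffs base m m.toNat 0 m
    let total := r * covB diffs r - covsumB diffs r
    total - r * (covB diffs r - base - m)

-- ===== PRECONDITION & SPEC =====
-- Pre_ excludes only inputs on which A never returns: with nonempty arr and m < 0 the guard
-- 'not m' never fires and the BFS keeps adding cells forever, so A diverges there.
def Pre_solution (n : Int) (m : Int) (arr : List Int) : Prop := 0 ≤ m ∨ arr = []
instance (n : Int) (m : Int) (arr : List Int) : Decidable (Pre_solution n m arr) := by unfold Pre_solution; infer_instance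
def pvWitness_solution : Int × Int × List Int := (0, 3, [4, -2])

def Spec_solution (n : Int) (m : Int) (arr : List Int) (out : Int) : Prop := out = solution_alt n m arr
instance (n : Int) (m : Int) (arr : List Int) (out : Int) : Decidable (Spec_solution n m arr out) := by unfold Spec_solution; infer_instance

-- ===== CLAIM (what is proved, stated in full; the proofs are below) =====
def Claim_equal_solution : Prop := ∀ (n : Int) (m : Int) (arr : List Int), Dom_solution n m arr → Pre_solution n m arr → Spec_solution n m arr (solution n m arr)

-- ===== LEMMAS AND PROOFS =====

-- `covP arr r z`: cell z is within distance r of some source in arr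
def covP (arr : List Int) (r : ℕ) (z : Int) : Prop := ∃ a ∈ arr, a - r ≤ z ∧ z ≤ a + r

-- the same set of cells as a Finset, for counting
def fcov (arr : List Int) (r : ℕ) : Finset ℤ :=
  (arr.flatMap (fun a => PySem.List.pyRange (a - (r : ℤ)) (a + r + 1) 1)).toFinset

-- the sorted distinct sources, as B computes them
def sortedS (arr : List Int) : List Int :=
  PySem.List.sorted (PySem.Set.ofList arr) (fun x => x) false

-- covB at a natural radius (avoids casts in the invariants)
def covN (diffs : List Int) (r : ℕ) : Int := covB diffs (r : Int)

lemma mem_fcov (arr : List Int) (r : ℕ) (z : Int) : z ∈ fcov arr r ↔ covP arr r z := by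
  simp only [fcov, covP, List.mem_toFinset, List.mem_flatMap, PySem.List.mem_pyRange_one]
  constructor
  · rintro ⟨a, ha, h1, h2⟩; exact ⟨a, ha, by omega, by omega⟩
  · rintro ⟨a, ha, h1, h2⟩; exact ⟨a, ha, by omega, by omega⟩

lemma covP_mono (arr : List Int) {r r' : ℕ} (h : r ≤ r') {z : Int} (hz : covP arr r z) :
    covP arr r' z := by
  obtain ⟨a, ha, h1, h2⟩ := hz
  refine ⟨a, ha, ?_, ?_⟩ <;> [skip; skip] <;>
  · have : (r : ℤ) ≤ r' := by exact_mod_cast h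
    omega

lemma mem_sortedS (arr : List Int) (z : Int) : z ∈ sortedS arr ↔ z ∈ arr := by
  simp [sortedS, PySem.List.mem_sorted, PySem.Set.mem_ofList]

lemma sortedS_pairwise (arr : List Int) : (sortedS arr).Pairwise (· < ·) := by
  simpa [sortedS] using PySem.List.sorted_ofList_pairwise_lt arr

lemma sortedS_ne_nil {arr : List Int} (h : arr ≠ []) : sortedS arr ≠ [] := by
  cases arr with
  | nil => simp at h
  | cons a t =>
    intro hs
    have : a ∈ sortedS (a :: t) := (mem_sortedS _ _).2 (by simp)
    rw [hs] at this; simp at this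

lemma covB_eq_sum (diffs : List Int) (r : Int) :
    covB diffs r = (2 * r + 1) + (diffs.map (fun g => min g (2 * r + 1))).sum := by
  simpa [covB] using PySem.List.foldl_add diffs (fun g => min g (2 * r + 1)) (2 * r + 1)

lemma covsumB_eq_sum (diffs : List Int) (r : Int) :
    covsumB diffs r = r * r + (diffs.map (fun g =>
      let u := min (r - 1) (PySem.Int.floordiv (g - 1) 2)
      (u + 1) * (u + 1) + (r - 1 - u) * g)).sum := by
  simpa [covsumB] using PySem.List.foldl_add diffs
    (fun g => let u := min (r - 1) (PySem.Int.floordiv (g - 1) 2)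
              (u + 1) * (u + 1) + (r - 1 - u) * g) (r * r)

lemma covB_succ_ge (diffs : List Int) (r : Int) : covB diffs r + 2 ≤ covB diffs (r + 1) := by
  rw [covB_eq_sum, covB_eq_sum]
  have h : (diffs.map (fun g => min g (2 * r + 1))).sum
      ≤ (diffs.map (fun g => min g (2 * (r + 1) + 1))).sum := by
    apply List.sum_le_sum
    intro g _
    exact min_le_min le_rfl (by omega)
  omega

lemma covB_mono (diffs : List Int) {r r' : Int} (h : r ≤ r') : covB diffs r ≤ covB diffs r' := by
  rw [covB_eq_sum, covB_eq_sum]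
  have hs : (diffs.map (fun g => min g (2 * r + 1))).sum
      ≤ (diffs.map (fun g => min g (2 * r' + 1))).sum := by
    apply List.sum_le_sum
    intro g _
    exact min_le_min le_rfl (by omega)
  omega

lemma covB_growth (diffs : List Int) (k : ℕ) : covB diffs 0 + 2 * k ≤ covN diffs k := by
  induction k with
  | zero => simp [covN]
  | succ k ih =>
    have h := covB_succ_ge diffs (k : Int)
    unfold covN at *
    push_cast
    push_cast at ih
    omega

lemma gaps_pos {s : List Int} (hs : s.Pairwise (· < ·)) : ∀ g ∈ gapsB s, 1 ≤ g := by
  induction s with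
  | nil => simp [gapsB]
  | cons a t ih =>
    cases t with
    | nil => simp [gapsB]
    | cons b t' =>
      intro g hgmem
      simp only [gapsB, List.tail_cons, List.zip_cons_cons, List.map_cons, List.mem_cons] at hgmem
      rcases hgmem with h | h
      · have hab : a < b := (List.pairwise_cons.1 hs).1 b (by simp)
        omega
      · exact ih (List.pairwise_cons.1 hs).2 g (by simpa [gapsB] using h)

-- cardinality of the covered set, per gap (the key counting lemma)
lemma gapsB_cons (a b : Int) (t : List Int) : gapsB (a :: b :: t) = (b - a) :: gapsB (b :: t) := rfl

lemma card_pyRangeFinset (x y : Int) :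
    ((PySem.List.pyRange x y 1).toFinset.card : Int) = max (y - x) 0 := by
  rw [List.toFinset_card_of_nodup (PySem.List.nodup_pyRange_one x y), PySem.List.length_pyRange_one]
  omega

lemma card_fcov_sorted (s : List Int) (hne : s ≠ []) (hs : s.Pairwise (· < ·)) (r : ℕ) :
    ((fcov s r).card : Int) = covN (gapsB s) r := by
  induction s with
  | nil => exact absurd rfl hne
  | cons a t ih =>
    cases t with
    | nil =>
      have : fcov [a] r = (PySem.List.pyRange (a - (r : ℤ)) (a + r + 1) 1).toFinset := by
        simp [fcov]
      rw [this, card_pyRangeFinset]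
      simp only [gapsB, covN, covB, List.tail_cons, List.zip_nil_right, List.map_nil,
        List.foldl_nil]
      omega
    | cons b t' =>
      have hab : a < b := (List.pairwise_cons.1 hs).1 b (by simp)
      have hbmin : ∀ c ∈ b :: t', b ≤ c := by
        intro c hc
        rcases hc with _ | hc
        · exact le_rfl
        · exact le_of_lt ((List.pairwise_cons.1 (List.pairwise_cons.1 hs).2).1 c (by assumption))
      have hsplit : fcov (a :: b :: t') r
          = (PySem.List.pyRange (a - (r : ℤ)) (a + r + 1) 1).toFinset ∪ fcov (b :: t') r := by
        simp [fcov, List.flatMap_cons, List.toFinset_append]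
      have hinter : (PySem.List.pyRange (a - (r : ℤ)) (a + r + 1) 1).toFinset ∩ fcov (b :: t') r
          = (PySem.List.pyRange (b - (r : ℤ)) (a + r + 1) 1).toFinset := by
        ext z
        simp only [Finset.mem_inter, List.mem_toFinset, PySem.List.mem_pyRange_one, mem_fcov, covP]
        constructor
        · rintro ⟨⟨h1, h2⟩, c, hc, hc1, hc2⟩
          have := hbmin c hc
          omega
        · rintro ⟨h1, h2⟩
          exact ⟨⟨by omega, by omega⟩, b, by simp, by omega, by omega⟩
      have hcard := Finset.card_union_add_card_inter
        (PySem.List.pyRange (a - (r : ℤ)) (a + r + 1) 1).toFinset (fcov (b :: t') r)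
      rw [hinter] at hcard
      have hA := card_pyRangeFinset (a - (r : ℤ)) (a + r + 1)
      have hI := card_pyRangeFinset (b - (r : ℤ)) (a + r + 1)
      have hB := ih (by simp) (List.pairwise_cons.1 hs).2
      have hcard' : ((fcov (a :: b :: t') r).card : Int)
          + ((PySem.List.pyRange (b - (r : ℤ)) (a + r + 1) 1).toFinset.card : Int)
          = ((PySem.List.pyRange (a - (r : ℤ)) (a + r + 1) 1).toFinset.card : Int)
          + ((fcov (b :: t') r).card : Int) := by
        rw [hsplit]; exact_mod_cast congrArg Nat.cast hcard
      rw [gapsB_cons]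
      have hcons : covN ((b - a) :: gapsB (b :: t')) r
          = covN (gapsB (b :: t')) r + min (b - a) (2 * (r : ℤ) + 1) := by
        simp only [covN, covB_eq_sum, List.map_cons, List.sum_cons]
        ring
      rw [hcons, ← hB]
      rw [hA, hI] at hcard'
      omega

lemma fcov_congr {arr arr' : List Int} (h : ∀ z, z ∈ arr ↔ z ∈ arr') (r : ℕ) :
    fcov arr r = fcov arr' r := by
  ext z
  simp only [mem_fcov, covP]
  constructor <;> rintro ⟨a, ha, h1, h2⟩
  · exact ⟨a, (h a).1 ha, h1, h2⟩
  · exact ⟨a, (h a).2 ha, h1, h2⟩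

lemma card_fcov (arr : List Int) (hne : arr ≠ []) (r : ℕ) :
    ((fcov arr r).card : Int) = covN (gapsB (sortedS arr)) r := by
  rw [fcov_congr (fun z => (mem_sortedS arr z).symm) r]
  exact card_fcov_sorted _ (sortedS_ne_nil hne) (sortedS_pairwise arr) r

lemma fcov_subset (arr : List Int) (r : ℕ) : fcov arr r ⊆ fcov arr (r + 1) := by
  intro z hz
  rw [mem_fcov] at *
  exact covP_mono arr (Nat.le_succ r) hz

-- a nodup list of exactly the new cells at radius r+1 has length cov(r+1) - cov(r)
lemma delta_card (arr : List Int) (hne : arr ≠ []) (r : ℕ) (add : List Int)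
    (hnd : add.Nodup) (hmem : ∀ z, z ∈ add ↔ (covP arr (r + 1) z ∧ ¬ covP arr r z)) :
    (add.length : Int) = covN (gapsB (sortedS arr)) (r + 1) - covN (gapsB (sortedS arr)) r := by
  have hfin : add.toFinset = fcov arr (r + 1) \ fcov arr r := by
    ext z
    simp only [List.mem_toFinset, Finset.mem_sdiff, mem_fcov]
    exact hmem z
  have hsub := fcov_subset arr r
  have hlen : add.length = add.toFinset.card := (List.toFinset_card_of_nodup hnd).symm
  have hsd : (fcov arr (r + 1) \ fcov arr r).card = (fcov arr (r + 1)).card - (fcov arr r).card := by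
    rw [Finset.card_sdiff, Finset.inter_eq_left.mpr hsub]
  have hle : (fcov arr r).card ≤ (fcov arr (r + 1)).card := Finset.card_le_card hsub
  have h1 := card_fcov arr hne r
  have h2 := card_fcov arr hne (r + 1)
  rw [hlen, hfin, hsd]
  omega

lemma delta_le (arr : List Int) (hne : arr ≠ []) (r : ℕ) (add : List Int)
    (hnd : add.Nodup) (hmem : ∀ z ∈ add, covP arr (r + 1) z ∧ ¬ covP arr r z) :
    (add.length : Int) ≤ covN (gapsB (sortedS arr)) (r + 1) - covN (gapsB (sortedS arr)) r := by
  have hfin : add.toFinset ⊆ fcov arr (r + 1) \ fcov arr r := by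
    intro z hz
    rw [List.mem_toFinset] at hz
    obtain ⟨h1, h2⟩ := hmem z hz
    rw [Finset.mem_sdiff, mem_fcov, mem_fcov]
    exact ⟨h1, h2⟩
  have hsub := fcov_subset arr r
  have hlen : add.length = add.toFinset.card := (List.toFinset_card_of_nodup hnd).symm
  have hc := Finset.card_le_card hfin
  have hsd : (fcov arr (r + 1) \ fcov arr r).card = (fcov arr (r + 1)).card - (fcov arr r).card := by
    rw [Finset.card_sdiff, Finset.inter_eq_left.mpr hsub]
  have hle : (fcov arr r).card ≤ (fcov arr (r + 1)).card := Finset.card_le_card hsub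
  have h1 := card_fcov arr hne r
  have h2 := card_fcov arr hne (r + 1)
  rw [hlen]
  omega

-- neighbours of a covered cell are covered at the next radius
lemma covP_near {arr : List Int} {r : ℕ} {c z : Int} (hc : covP arr r c)
    (hz : z = c - 1 ∨ z = c + 1) : covP arr (r + 1) z := by
  obtain ⟨a, ha, h1, h2⟩ := hc
  refine ⟨a, ha, ?_, ?_⟩ <;> push_cast <;> omega

-- a cell newly covered at radius r+2 is adjacent to a cell newly covered at radius r+1
lemma adj_delta {arr : List Int} {r : ℕ} {z : Int}
    (h1 : covP arr (r + 2) z) (h2 : ¬ covP arr (r + 1) z) :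
    (covP arr (r + 1) (z - 1) ∧ ¬ covP arr r (z - 1)) ∨
    (covP arr (r + 1) (z + 1) ∧ ¬ covP arr r (z + 1)) := by
  obtain ⟨a, ha, ha1, ha2⟩ := h1
  simp only [covP, not_exists] at h2
  have h2' := h2 a
  push_cast at ha1 ha2 h2' ⊢
  have hz : z = a - ((r : ℤ) + 2) ∨ z = a + ((r : ℤ) + 2) := by
    by_contra h
    push_neg at h
    exact h2' ⟨ha, by omega, by omega⟩
  rcases hz with hz | hz
  · right
    refine ⟨⟨a, ha, by omega, by omega⟩, ?_⟩
    rintro ⟨b, hb, hb1, hb2⟩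
    have := h2 b
    push_cast at this hb1 hb2
    exact this ⟨hb, by omega, by omega⟩
  · left
    refine ⟨⟨a, ha, by omega, by omega⟩, ?_⟩
    rintro ⟨b, hb, hb1, hb2⟩
    have := h2 b
    push_cast at this hb1 hb2
    exact this ⟨hb, by omega, by omega⟩

-- cells at distance exactly 1 are adjacent to a source
lemma adj_base {arr : List Int} {z : Int}
    (h1 : covP arr 1 z) (h2 : ¬ covP arr 0 z) : z - 1 ∈ arr ∨ z + 1 ∈ arr := by
  obtain ⟨a, ha, ha1, ha2⟩ := h1
  simp only [covP, not_exists] at h2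
  have h2' := h2 a
  push_cast at ha1 ha2 h2'
  have hz : z = a - 1 ∨ z = a + 1 := by
    by_contra h
    push_neg at h
    exact h2' ⟨ha, by omega, by omega⟩
  rcases hz with hz | hz
  · right; rw [show z + 1 = a by omega]; exact ha
  · left; rw [show z - 1 = a by omega]; exact ha

-- one unfolding of the while loop (the two directions written out)
lemma loopA_succ (fuel : ℕ) (curr cost : Int) (rest : List (Int × Int)) (visited : Std.HashSet Int) (m ans : Int) :
    loopA (fuel + 1) ((curr, cost) :: rest) visited m ans =
      if visited.contains (curr + -1) || m == 0 then
        (if visited.contains (curr + 1) || m == 0 then loopA fuel rest visited m ans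
         else loopA fuel (rest ++ [(curr + 1, cost + 1)]) (visited.insert (curr + 1)) (m - 1) (ans + (cost + 1)))
      else
        (if (visited.insert (curr + -1)).contains (curr + 1) || (m - 1) == 0 then
           loopA fuel (rest ++ [(curr + -1, cost + 1)]) (visited.insert (curr + -1)) (m - 1) (ans + (cost + 1))
         else loopA fuel (rest ++ [(curr + -1, cost + 1)] ++ [(curr + 1, cost + 1)])
           ((visited.insert (curr + -1)).insert (curr + 1)) (m - 1 - 1) (ans + (cost + 1) + (cost + 1))) := by
  simp only [loopA, List.foldl]
  split_ifs <;> rfl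

-- once m = 0 the loop only drains the queue and returns ans unchanged
lemma loopA_drain : ∀ (fuel : ℕ) (q : List (Int × Int)) (v : Std.HashSet Int) (ans : Int),
    loopA fuel q v 0 ans = ans := by
  intro fuel
  induction fuel with
  | zero => intro q v ans; rfl
  | succ fuel ih =>
    intro q v ans
    cases q with
    | nil => rfl
    | cons p rest =>
      obtain ⟨curr, cost⟩ := p
      rw [loopA_succ]
      simp only [BEq.rfl, Bool.or_true, if_true]
      exact ih rest v ans

lemma loopA_congr {f1 f2 : ℕ} {q1 q2 : List (Int × Int)} {v1 v2 : Std.HashSet Int} {m1 m2 a1 a2 : Int}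
    (hf : f1 = f2) (hq : q1 = q2) (hv : v1 = v2) (hm : m1 = m2) (ha : a1 = a2) :
    loopA f1 q1 v1 m1 a1 = loopA f2 q2 v2 m2 a2 := by
  subst hf hq hv hm ha; rfl

lemma mem_foldl_insert (l : List Int) (v : Std.HashSet Int) (z : Int) :
    z ∈ l.foldl (fun v x => v.insert x) v ↔ z ∈ v ∨ z ∈ l := by
  induction l generalizing v with
  | nil => simp
  | cons x t ih =>
    simp only [List.foldl_cons, ih, Std.HashSet.mem_insert, beq_iff_eq, List.mem_cons]
    constructor
    · rintro ((h | h) | h)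
      · exact Or.inr (Or.inl h.symm)
      · exact Or.inl h
      · exact Or.inr (Or.inr h)
    · rintro (h | h | h)
      · exact Or.inl (Or.inr h)
      · exact Or.inl (Or.inl h.symm)
      · exact Or.inr h

lemma hvis_insert {arr : List Int} {r : ℕ} {visited : Std.HashSet Int} {nx : List Int} {x : Int}
    (hvis : ∀ z, z ∈ visited ↔ (covP arr r z ∨ z ∈ nx)) :
    ∀ z, z ∈ visited.insert x ↔ (covP arr r z ∨ z ∈ nx ++ [x]) := by
  intro z
  simp only [Std.HashSet.mem_insert, beq_iff_eq, List.mem_append, List.mem_singleton, hvis z]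
  constructor
  · rintro (h | h)
    · exact Or.inr (Or.inr h.symm)
    · rcases h with h | h
      · exact Or.inl h
      · exact Or.inr (Or.inl h)
  · rintro (h | h | h)
    · exact Or.inr (Or.inl h)
    · exact Or.inr (Or.inr h)
    · exact Or.inl h.symm

-- processing the pending cost-r cells of the queue (the BFS level invariant)
lemma inner (arr : List Int) (r : ℕ) :
    ∀ (rest : List Int) (fuel : ℕ) (nx : List Int) (visited : Std.HashSet Int) (m ans : Int),
    rest.length ≤ fuel →
    (∀ c ∈ rest, covP arr r c) →
    nx.Nodup →
    (∀ z ∈ nx, covP arr (r + 1) z ∧ ¬ covP arr r z) →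
    (∀ z, z ∈ visited ↔ (covP arr r z ∨ z ∈ nx)) →
    0 ≤ m →
    ∃ add : List Int,
      (nx ++ add).Nodup ∧
      (∀ z ∈ add, covP arr (r + 1) z ∧ ¬ covP arr r z) ∧
      (add.length : Int) ≤ m ∧
      (m - add.length = 0 ∨
        ∀ z, covP arr (r + 1) z → ¬ covP arr r z →
          (z ∈ nx ∨ z - 1 ∈ rest ∨ z + 1 ∈ rest) → z ∈ nx ++ add) ∧
      loopA fuel (rest.map (fun c => (c, (r : Int))) ++ nx.map (fun z => (z, (r : Int) + 1))) visited m ans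
        = loopA (fuel - rest.length) ((nx ++ add).map (fun z => (z, (r : Int) + 1)))
            (add.foldl (fun v x => v.insert x) visited) (m - add.length)
            (ans + ((r : Int) + 1) * add.length) := by
  intro rest
  induction rest with
  | nil =>
    intro fuel nx visited m ans hfuel hrest hnd hnx hvis hm
    refine ⟨[], by simpa using hnd, by simp, by simpa using hm, ?_, ?_⟩
    · right
      intro z hc hnc hadj
      rcases hadj with h | h | h
      · simpa using h
      · simp at h
      · simp at h
    · simp
  | cons c rest' ih =>
    intro fuel nx visited m ans hfuel hrest hnd hnx hvis hm
    obtain ⟨fuel', rfl⟩ : ∃ f', fuel = f' + 1 := ⟨fuel - 1, by simp at hfuel; omega⟩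
    have hcovc : covP arr r c := hrest c (by simp)
    have hrest' : ∀ x ∈ rest', covP arr r x := fun x hx => hrest x (by simp [hx])
    have hfuel' : rest'.length ≤ fuel' := by simp at hfuel; omega
    have hnxvis : ∀ z ∈ nx, z ∈ visited := fun z hz => (hvis z).2 (Or.inr hz)
    have hz12 : c + 1 ≠ c + -1 := by omega
    rw [List.map_cons, List.cons_append, loopA_succ]
    by_cases hm0 : m = 0
    · subst hm0
      rw [if_pos (by simp), if_pos (by simp)]
      obtain ⟨add', hnd', hmem', hlen', hdisj', heq'⟩ :=
        ih fuel' nx visited 0 ans hfuel' hrest' hnd hnx hvis le_rfl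
      have hadd' : add' = [] := by
        have := List.length_eq_zero_iff.mp (by omega : add'.length = 0)
        exact this
      subst hadd'
      refine ⟨[], by simpa using hnd, by simp, by simp, Or.inl (by simp), ?_⟩
      simp only [List.append_nil] at heq' ⊢
      rw [heq']
      exact loopA_congr (by simp only [List.length_cons]; omega) rfl rfl (by simp) (by simp)
    · have hmpos : 0 < m := lt_of_le_of_ne hm (Ne.symm hm0)
      have hbeq : (m == 0) = false := by simp [hm0]
      by_cases h1 : c + -1 ∈ visited
      · rw [if_pos (by simp [h1])]
        by_cases h2 : c + 1 ∈ visited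
        · -- both neighbours already visited
          rw [if_pos (by simp [h2])]
          obtain ⟨add', hnd', hmem', hlen', hdisj', heq'⟩ :=
            ih fuel' nx visited m ans hfuel' hrest' hnd hnx hvis hm
          refine ⟨add', hnd', hmem', hlen', ?_, ?_⟩
          · rcases hdisj' with h | h
            · exact Or.inl h
            · right
              intro z hc hnc hadj
              refine h z hc hnc ?_
              rcases hadj with hz | hz | hz
              · exact Or.inl hz
              · rcases List.mem_cons.mp hz with hz | hz
                · have hzc : z = c + 1 := by omega
                  rw [hzc] at hnc ⊢
                  rcases (hvis (c + 1)).1 h2 with hcv | hcv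
                  · exact absurd hcv hnc
                  · exact Or.inl hcv
                · exact Or.inr (Or.inl hz)
              · rcases List.mem_cons.mp hz with hz | hz
                · have hzc : z = c + -1 := by omega
                  rw [hzc] at hnc ⊢
                  rcases (hvis (c + -1)).1 h1 with hcv | hcv
                  · exact absurd hcv hnc
                  · exact Or.inl hcv
                · exact Or.inr (Or.inr hz)
          · rw [heq']
            exact loopA_congr (by simp only [List.length_cons]; omega) rfl rfl rfl rfl
        · -- add c+1 only
          rw [if_neg (by simp [h2, hbeq])]
          have hnm : c + 1 ∉ nx := fun hmem => h2 (hnxvis _ hmem)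
          have hnx2 : ∀ z ∈ nx ++ [c + 1], covP arr (r + 1) z ∧ ¬ covP arr r z := by
            intro z hz
            rcases List.mem_append.mp hz with hz | hz
            · exact hnx z hz
            · have : z = c + 1 := by simpa using hz
              subst this
              refine ⟨covP_near hcovc (Or.inr rfl), ?_⟩
              intro hcov
              exact h2 ((hvis _).2 (Or.inl hcov))
          have hvis2 : ∀ z, z ∈ visited.insert (c + 1) ↔ (covP arr r z ∨ z ∈ nx ++ [c + 1]) :=
            hvis_insert hvis
          obtain ⟨add', hnd', hmem', hlen', hdisj', heq'⟩ :=
            ih fuel' (nx ++ [c + 1]) (visited.insert (c + 1)) (m - 1) (ans + ((r : Int) + 1))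
              hfuel' hrest' (by simp [List.nodup_append, hnd]; intro a ha h; subst h; exact hnm ha) hnx2 hvis2 (by omega)
          refine ⟨(c + 1) :: add', ?_, ?_, ?_, ?_, ?_⟩
          · rw [show nx ++ (c + 1) :: add' = (nx ++ [c + 1]) ++ add' by simp]
            exact hnd'
          · intro z hz
            rcases List.mem_cons.mp hz with hz | hz
            · subst hz; exact hnx2 (c + 1) (by simp)
            · exact hmem' z hz
          · simp only [List.length_cons]
            push_cast
            omega
          · rcases hdisj' with h | h
            · left; simp only [List.length_cons]; push_cast at h ⊢; omega
            · right
              intro z hc hnc hadj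
              have hgoal : z ∈ (nx ++ [c + 1]) ++ add' → z ∈ nx ++ (c + 1) :: add' := by
                intro hmem3; simpa [List.append_assoc] using hmem3
              refine hgoal (h z hc hnc ?_)
              rcases hadj with hz | hz | hz
              · exact Or.inl (by simp [hz])
              · rcases List.mem_cons.mp hz with hz | hz
                · have hzc : z = c + 1 := by omega
                  exact Or.inl (by simp [hzc])
                · exact Or.inr (Or.inl hz)
              · rcases List.mem_cons.mp hz with hz | hz
                · have hzc : z = c + -1 := by omega
                  rw [hzc] at hnc ⊢
                  rcases (hvis (c + -1)).1 h1 with hcv | hcv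
                  · exact absurd hcv hnc
                  · exact Or.inl (by simp [hcv])
                · exact Or.inr (Or.inr hz)
          · 
            have hq : (rest'.map (fun c => (c, (r : Int))) ++ nx.map (fun z => (z, (r : Int) + 1)))
                ++ [(c + 1, (r : Int) + 1)]
                = rest'.map (fun c => (c, (r : Int))) ++ (nx ++ [c + 1]).map (fun z => (z, (r : Int) + 1)) := by
              simp [List.append_assoc]
            rw [show loopA fuel' (rest'.map (fun c => (c, (r : Int))) ++ nx.map (fun z => (z, (r : Int) + 1))
                  ++ [(c + 1, (r : Int) + 1)]) (visited.insert (c + 1)) (m - 1) (ans + ((r : Int) + 1))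
                = loopA fuel' (rest'.map (fun c => (c, (r : Int)))
                    ++ (nx ++ [c + 1]).map (fun z => (z, (r : Int) + 1)))
                    (visited.insert (c + 1)) (m - 1) (ans + ((r : Int) + 1))
              from loopA_congr rfl (by simpa [List.append_assoc] using hq) rfl rfl rfl]
            rw [heq']
            exact loopA_congr (by simp only [List.length_cons]; omega)
              (by simp [List.append_assoc])
              (by simp [List.append_assoc])
              (by simp only [List.length_cons, List.length_append, List.length_singleton]; push_cast; ring)
              (by simp only [List.length_cons, List.length_append, List.length_singleton]; push_cast; ring)
      · -- add c + -1
        rw [if_neg (by simp [h1, hbeq])]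
        have hnm1 : c + -1 ∉ nx := fun hmem => h1 (hnxvis _ hmem)
        have hcov1 : covP arr (r + 1) (c + -1) ∧ ¬ covP arr r (c + -1) := by
          refine ⟨covP_near hcovc (Or.inl (by ring)), ?_⟩
          intro hcov
          exact h1 ((hvis _).2 (Or.inl hcov))
        by_cases h2 : c + 1 ∈ visited
        · -- second neighbour already visited
          rw [if_pos (by simp [h2])]
          have hnx1 : ∀ z ∈ nx ++ [c + -1], covP arr (r + 1) z ∧ ¬ covP arr r z := by
            intro z hz
            rcases List.mem_append.mp hz with hz | hz
            · exact hnx z hz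
            · have : z = c + -1 := by simpa using hz
              subst this; exact hcov1
          have hvis1 : ∀ z, z ∈ visited.insert (c + -1) ↔ (covP arr r z ∨ z ∈ nx ++ [c + -1]) :=
            hvis_insert hvis
          obtain ⟨add', hnd', hmem', hlen', hdisj', heq'⟩ :=
            ih fuel' (nx ++ [c + -1]) (visited.insert (c + -1)) (m - 1) (ans + ((r : Int) + 1))
              hfuel' hrest' (by simp [List.nodup_append, hnd]; intro a ha h; subst h; exact hnm1 ha) hnx1 hvis1 (by omega)
          refine ⟨(c + -1) :: add', ?_, ?_, ?_, ?_, ?_⟩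
          · rw [show nx ++ (c + -1) :: add' = (nx ++ [c + -1]) ++ add' by simp]
            exact hnd'
          · intro z hz
            rcases List.mem_cons.mp hz with hz | hz
            · subst hz; exact hcov1
            · exact hmem' z hz
          · simp only [List.length_cons]; push_cast; omega
          · rcases hdisj' with h | h
            · left; simp only [List.length_cons]; push_cast at h ⊢; omega
            · right
              intro z hc hnc hadj
              have hgoal : z ∈ (nx ++ [c + -1]) ++ add' → z ∈ nx ++ (c + -1) :: add' := by
                intro hmem3; simpa [List.append_assoc] using hmem3
              refine hgoal (h z hc hnc ?_)
              rcases hadj with hz | hz | hz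
              · exact Or.inl (by simp [hz])
              · rcases List.mem_cons.mp hz with hz | hz
                · have hzc : z = c + 1 := by omega
                  rw [hzc] at hnc ⊢
                  rcases (hvis (c + 1)).1 h2 with hcv | hcv
                  · exact absurd hcv hnc
                  · exact Or.inl (by simp [hcv])
                · exact Or.inr (Or.inl hz)
              · rcases List.mem_cons.mp hz with hz | hz
                · have hzc : z = c + -1 := by omega
                  exact Or.inl (by simp [hzc])
                · exact Or.inr (Or.inr hz)
          · 
            rw [show loopA fuel' (rest'.map (fun c => (c, (r : Int))) ++ nx.map (fun z => (z, (r : Int) + 1))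
                  ++ [(c + -1, (r : Int) + 1)]) (visited.insert (c + -1)) (m - 1) (ans + ((r : Int) + 1))
                = loopA fuel' (rest'.map (fun c => (c, (r : Int)))
                    ++ (nx ++ [c + -1]).map (fun z => (z, (r : Int) + 1)))
                    (visited.insert (c + -1)) (m - 1) (ans + ((r : Int) + 1))
              from loopA_congr rfl (by simp [List.append_assoc]) rfl rfl rfl]
            rw [heq']
            exact loopA_congr (by simp only [List.length_cons]; omega)
              (by simp [List.append_assoc])
              (by simp [List.append_assoc])
              (by simp only [List.length_cons, List.length_append, List.length_singleton]; push_cast; ring)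
              (by simp only [List.length_cons, List.length_append, List.length_singleton]; push_cast; ring)
        · -- second neighbour not visited
          by_cases hm1 : m - 1 = 0
          · -- out of budget for the second neighbour
            rw [if_pos (by simp [hm1])]
            have hnx1 : ∀ z ∈ nx ++ [c + -1], covP arr (r + 1) z ∧ ¬ covP arr r z := by
              intro z hz
              rcases List.mem_append.mp hz with hz | hz
              · exact hnx z hz
              · have : z = c + -1 := by simpa using hz
                subst this; exact hcov1
            have hvis1 : ∀ z, z ∈ visited.insert (c + -1) ↔ (covP arr r z ∨ z ∈ nx ++ [c + -1]) :=
              hvis_insert hvis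
            obtain ⟨add', hnd', hmem', hlen', hdisj', heq'⟩ :=
              ih fuel' (nx ++ [c + -1]) (visited.insert (c + -1)) (m - 1) (ans + ((r : Int) + 1))
                hfuel' hrest' (by simp [List.nodup_append, hnd]; intro a ha h; subst h; exact hnm1 ha) hnx1 hvis1 (by omega)
            have hadd' : add' = [] := by
              refine List.length_eq_zero_iff.mp ?_
              omega
            subst hadd'
            refine ⟨[c + -1], by simpa using hnd', ?_, by simp; omega, Or.inl (by simp; omega), ?_⟩
            · intro z hz
              have : z = c + -1 := by simpa using hz
              subst this; exact hcov1
            · 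
              rw [show loopA fuel' (rest'.map (fun c => (c, (r : Int))) ++ nx.map (fun z => (z, (r : Int) + 1))
                    ++ [(c + -1, (r : Int) + 1)]) (visited.insert (c + -1)) (m - 1) (ans + ((r : Int) + 1))
                  = loopA fuel' (rest'.map (fun c => (c, (r : Int)))
                      ++ (nx ++ [c + -1]).map (fun z => (z, (r : Int) + 1)))
                      (visited.insert (c + -1)) (m - 1) (ans + ((r : Int) + 1))
                from loopA_congr rfl (by simp [List.append_assoc]) rfl rfl rfl]
              rw [heq']
              exact loopA_congr (by simp only [List.length_cons]; omega)
                (by simp)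
                (by simp)
                (by simp)
                (by simp)
          · -- add both neighbours
            rw [if_neg (by simp [h2, hm1, show ¬ (c + -1 = c + 1) by omega])]
            have hnm2 : c + 1 ∉ nx := fun hmem => h2 (hnxvis _ hmem)
            have hcov2 : covP arr (r + 1) (c + 1) ∧ ¬ covP arr r (c + 1) := by
              refine ⟨covP_near hcovc (Or.inr rfl), ?_⟩
              intro hcov
              exact h2 ((hvis _).2 (Or.inl hcov))
            have hnx12 : ∀ z ∈ (nx ++ [c + -1]) ++ [c + 1], covP arr (r + 1) z ∧ ¬ covP arr r z := by
              intro z hz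
              rcases List.mem_append.mp hz with hz | hz
              · rcases List.mem_append.mp hz with hz | hz
                · exact hnx z hz
                · have : z = c + -1 := by simpa using hz
                  subst this; exact hcov1
              · have : z = c + 1 := by simpa using hz
                subst this; exact hcov2
            have hvis12 : ∀ z, z ∈ (visited.insert (c + -1)).insert (c + 1)
                ↔ (covP arr r z ∨ z ∈ (nx ++ [c + -1]) ++ [c + 1]) :=
              hvis_insert (hvis_insert hvis)
            have hnd12 : ((nx ++ [c + -1]) ++ [c + 1]).Nodup := by
              simp [List.nodup_append, hnd, Ne.symm hz12]
              intro a ha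
              exact ⟨fun h => hnm1 (h ▸ ha), fun h => hnm2 (h ▸ ha)⟩
            obtain ⟨add', hnd', hmem', hlen', hdisj', heq'⟩ :=
              ih fuel' ((nx ++ [c + -1]) ++ [c + 1]) ((visited.insert (c + -1)).insert (c + 1)) (m - 1 - 1)
                (ans + ((r : Int) + 1) + ((r : Int) + 1))
                hfuel' hrest' hnd12 hnx12 hvis12 (by omega)
            refine ⟨(c + -1) :: (c + 1) :: add', ?_, ?_, ?_, ?_, ?_⟩
            · rw [show nx ++ (c + -1) :: (c + 1) :: add' = ((nx ++ [c + -1]) ++ [c + 1]) ++ add' by simp]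
              exact hnd'
            · intro z hz
              rcases List.mem_cons.mp hz with hz | hz
              · subst hz; exact hcov1
              · rcases List.mem_cons.mp hz with hz | hz
                · subst hz; exact hcov2
                · exact hmem' z hz
            · simp only [List.length_cons]; push_cast; omega
            · rcases hdisj' with h | h
              · left; simp only [List.length_cons]; push_cast at h ⊢; omega
              · right
                intro z hc hnc hadj
                have hgoal : z ∈ ((nx ++ [c + -1]) ++ [c + 1]) ++ add'
                    → z ∈ nx ++ (c + -1) :: (c + 1) :: add' := by
                  intro hmem3; simpa [List.append_assoc] using hmem3
                refine hgoal (h z hc hnc ?_)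
                rcases hadj with hz | hz | hz
                · exact Or.inl (by simp [hz])
                · rcases List.mem_cons.mp hz with hz | hz
                  · have hzc : z = c + 1 := by omega
                    exact Or.inl (by simp [hzc])
                  · exact Or.inr (Or.inl hz)
                · rcases List.mem_cons.mp hz with hz | hz
                  · have hzc : z = c + -1 := by omega
                    exact Or.inl (by simp [hzc])
                  · exact Or.inr (Or.inr hz)
            · 
              rw [show loopA fuel' (rest'.map (fun c => (c, (r : Int))) ++ nx.map (fun z => (z, (r : Int) + 1))
                    ++ [(c + -1, (r : Int) + 1)] ++ [(c + 1, (r : Int) + 1)])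
                    ((visited.insert (c + -1)).insert (c + 1)) (m - 1 - 1) (ans + ((r : Int) + 1) + ((r : Int) + 1))
                  = loopA fuel' (rest'.map (fun c => (c, (r : Int)))
                      ++ ((nx ++ [c + -1]) ++ [c + 1]).map (fun z => (z, (r : Int) + 1)))
                      ((visited.insert (c + -1)).insert (c + 1)) (m - 1 - 1) (ans + ((r : Int) + 1) + ((r : Int) + 1))
                from loopA_congr rfl (by simp [List.append_assoc]) rfl rfl rfl]
              rw [heq']
              exact loopA_congr (by simp only [List.length_cons]; omega)
                (by simp [List.append_assoc])
                (by simp [List.append_assoc])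
                (by simp only [List.length_cons, List.length_append, List.length_singleton]; push_cast; ring)
                (by simp only [List.length_cons, List.length_append, List.length_singleton]; push_cast; ring)

lemma delta_ge_two (diffs : List Int) (r : ℕ) : covN diffs r + 2 ≤ covN diffs (r + 1) := by
  have := covB_succ_ge diffs (r : Int)
  unfold covN; push_cast; omega

-- reference value: total cost of the first m cells the BFS adds, level by level from radius r
def bfsSum (diffs : List Int) (r : ℕ) (mN : ℕ) : Int :=
  if h : mN = 0 then 0
  else
    let d := covN diffs (r + 1) - covN diffs r
    if (mN : Int) ≤ d then ((r : Int) + 1) * mN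
    else ((r : Int) + 1) * d + bfsSum diffs (r + 1) (mN - d.toNat)
  termination_by mN
  decreasing_by
    have h2 := delta_ge_two diffs r
    omega

-- the whole BFS from a full level equals the reference sum
lemma outer (arr : List Int) (hne : arr ≠ []) :
    ∀ (mN : ℕ) (r : ℕ) (frontier : List Int) (visited : Std.HashSet Int) (m ans : Int) (fuel : ℕ),
    m.toNat = mN → 0 < m →
    (∀ c ∈ frontier, covP arr r c) →
    (∀ z, covP arr (r + 1) z → ¬ covP arr r z → (z - 1 ∈ frontier ∨ z + 1 ∈ frontier)) →
    (∀ z, z ∈ visited ↔ covP arr r z) →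
    frontier.length + 2 * m.toNat ≤ fuel →
    loopA fuel (frontier.map (fun c => (c, (r : Int)))) visited m ans
      = ans + bfsSum (gapsB (sortedS arr)) r m.toNat := by
  intro mN
  induction mN using Nat.strong_induction_on with
  | _ mN ihm =>
    intro r frontier visited m ans fuel hmN hmpos hfr hadj hvis hfuel
    obtain ⟨add, hnd, hmem, hlen, hdisj, heq⟩ :=
      inner arr r frontier fuel [] visited m ans (by omega) hfr List.nodup_nil (by simp)
        (fun z => by simpa using hvis z) (le_of_lt hmpos)
    simp only [List.map_nil, List.append_nil, List.nil_append] at heq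
    have hnd' : add.Nodup := by simpa using hnd
    have hne0 : ¬ mN = 0 := by omega
    rw [hmN, heq]
    by_cases hm' : m - (add.length : Int) = 0
    · rw [hm', loopA_drain]
      have hle := delta_le arr hne r add hnd' hmem
      rw [bfsSum, dif_neg hne0]
      have hil : (mN : Int) ≤ covN (gapsB (sortedS arr)) (r + 1) - covN (gapsB (sortedS arr)) r := by
        omega
      rw [if_pos hil]
      have hlm : (add.length : Int) = (mN : Int) := by omega
      rw [hlm]
    · have hcomp := hdisj.resolve_left hm'
      have haddiff : ∀ z, z ∈ add ↔ (covP arr (r + 1) z ∧ ¬ covP arr r z) := by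
        intro z
        refine ⟨fun hz => hmem z hz, fun hz => ?_⟩
        have := hcomp z hz.1 hz.2 (Or.inr (hadj z hz.1 hz.2))
        simpa using this
      have hcard := delta_card arr hne r add hnd' haddiff
      have hd2 := delta_ge_two (gapsB (sortedS arr)) r
      have hmpos' : 0 < m - (add.length : Int) := lt_of_le_of_ne (by omega) (Ne.symm hm')
      have hadj' : ∀ z, covP arr (r + 1 + 1) z → ¬ covP arr (r + 1) z →
          (z - 1 ∈ add ∨ z + 1 ∈ add) := by
        intro z h1 h2
        rcases adj_delta h1 h2 with h | h
        · exact Or.inl ((haddiff (z - 1)).2 h)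
        · exact Or.inr ((haddiff (z + 1)).2 h)
      have hvis' : ∀ z, z ∈ add.foldl (fun v x => v.insert x) visited ↔ covP arr (r + 1) z := by
        intro z
        rw [mem_foldl_insert, hvis z, haddiff z]
        constructor
        · rintro (hc | hc)
          · exact covP_mono arr (Nat.le_succ r) hc
          · exact hc.1
        · intro hc
          by_cases hr : covP arr r z
          · exact Or.inl hr
          · exact Or.inr ⟨hc, hr⟩
      have hrec := ihm (m - (add.length : Int)).toNat (by omega) (r + 1) add
        (add.foldl (fun v x => v.insert x) visited)
        (m - (add.length : Int)) (ans + ((r : Int) + 1) * add.length) (fuel - frontier.length)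
        rfl hmpos' (fun c hc => (hmem c hc).1) hadj' hvis' (by omega)
      rw [show ((r + 1 : ℕ) : Int) = (r : Int) + 1 by push_cast; ring] at hrec
      rw [hrec]
      have hil : ¬ ((mN : Int) ≤ covN (gapsB (sortedS arr)) (r + 1) - covN (gapsB (sortedS arr)) r) := by
        omega
      have hmt : (m - (add.length : Int)).toNat
          = mN - (covN (gapsB (sortedS arr)) (r + 1) - covN (gapsB (sortedS arr)) r).toNat := by
        omega
      rw [hmt]
      conv_rhs => rw [bfsSum]
      rw [dif_neg hne0, if_neg hil]
      rw [hcard]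
      push_cast
      ring

-- partial sums of d * (cov(d) - cov(d-1))
def ssum (diffs : List Int) : ℕ → Int
  | 0 => 0
  | p + 1 => ssum diffs p + ((p : Int) + 1) * (covN diffs (p + 1) - covN diffs p)

lemma ssum_eq (diffs : List Int) (p : ℕ) :
    ssum diffs p = (p : Int) * covN diffs p - ∑ d ∈ Finset.range p, covN diffs d := by
  induction p with
  | zero => simp [ssum]
  | succ p ih =>
    rw [Finset.sum_range_succ]
    simp only [ssum]
    rw [ih]
    push_cast
    ring

-- per-gap closed form of sum_{d<p} min(g, 2d+1)
lemma pergap (g : Int) (hg : 1 ≤ g) (p : ℕ) :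
    (min ((p : Int) - 1) (PySem.Int.floordiv (g - 1) 2) + 1)
        * (min ((p : Int) - 1) (PySem.Int.floordiv (g - 1) 2) + 1)
      + ((p : Int) - 1 - min ((p : Int) - 1) (PySem.Int.floordiv (g - 1) 2)) * g
      = ∑ d ∈ Finset.range p, min g (2 * (d : Int) + 1) := by
  have hfd := PySem.Int.floordiv_mul_add_mod (g - 1) 2
  have hm0 : 0 ≤ PySem.Int.mod (g - 1) 2 := PySem.Int.mod_nonneg _ (by omega)
  have hm1 : PySem.Int.mod (g - 1) 2 < 2 := PySem.Int.mod_lt _ (by omega)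
  set q := PySem.Int.floordiv (g - 1) 2 with hqdef
  have hq : 2 * q ≤ g - 1 ∧ g - 1 ≤ 2 * q + 1 := by omega
  induction p with
  | zero =>
    have h1 : min ((0 : Int) - 1) q = -1 := min_eq_left (by omega)
    simp only [Nat.cast_zero, h1, Finset.range_zero, Finset.sum_empty]
    ring
  | succ p ih =>
    rw [Finset.sum_range_succ, ← ih]
    rcases le_or_gt ((p : Int)) q with hpq | hpq
    · have h1 : min ((p : Int) - 1) q = (p : Int) - 1 := min_eq_left (by omega)
      have h2 : min (((p : ℕ) + 1 : Int) - 1) q = (p : Int) := by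
        rw [show ((p : ℕ) + 1 : Int) - 1 = (p : Int) by push_cast; ring]
        exact min_eq_left (by omega)
      have h3 : min g (2 * (p : Int) + 1) = 2 * (p : Int) + 1 := min_eq_right (by omega)
      push_cast [h1, h3] at *
      rw [h2]
      ring
    · have h1 : min ((p : Int) - 1) q = q := min_eq_right (by omega)
      have h2 : min (((p : ℕ) + 1 : Int) - 1) q = q := by
        rw [show ((p : ℕ) + 1 : Int) - 1 = (p : Int) by push_cast; ring]
        exact min_eq_right (by omega)
      have h3 : min g (2 * (p : Int) + 1) = g := min_eq_left (by omega)
      push_cast [h1, h3] at *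
      rw [h2]
      ring

lemma sum_odd (p : ℕ) : ∑ d ∈ Finset.range p, (2 * (d : Int) + 1) = (p : Int) * p := by
  induction p with
  | zero => simp
  | succ p ih =>
    rw [Finset.sum_range_succ, ih]
    push_cast
    ring

lemma sum_swap_list (l : List Int) (p : ℕ) (f : ℕ → Int → Int) :
    ∑ d ∈ Finset.range p, (l.map (f d)).sum = (l.map (fun g => ∑ d ∈ Finset.range p, f d g)).sum := by
  induction l with
  | nil => simp
  | cons g t ih =>
    simp only [List.map_cons, List.sum_cons]
    rw [Finset.sum_add_distrib, ih]

lemma covsum_eq (s : List Int) (hs : s.Pairwise (· < ·)) (p : ℕ) :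
    covsumB (gapsB s) (p : Int) = ∑ d ∈ Finset.range p, covN (gapsB s) d := by
  have hR : ∑ d ∈ Finset.range p, covN (gapsB s) d
      = (p : Int) * p + ((gapsB s).map (fun g => ∑ d ∈ Finset.range p, min g (2 * (d : Int) + 1))).sum := by
    have : ∀ d : ℕ, covN (gapsB s) d
        = (2 * (d : Int) + 1) + ((gapsB s).map (fun g => min g (2 * (d : Int) + 1))).sum := by
      intro d; exact covB_eq_sum _ _
    calc ∑ d ∈ Finset.range p, covN (gapsB s) d
        = ∑ d ∈ Finset.range p, ((2 * (d : Int) + 1)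
            + ((gapsB s).map (fun g => min g (2 * (d : Int) + 1))).sum) := by
          exact Finset.sum_congr rfl (fun d _ => this d)
      _ = (∑ d ∈ Finset.range p, (2 * (d : Int) + 1))
            + ∑ d ∈ Finset.range p, ((gapsB s).map (fun g => min g (2 * (d : Int) + 1))).sum := by
          rw [Finset.sum_add_distrib]
      _ = (p : Int) * p + ((gapsB s).map (fun g => ∑ d ∈ Finset.range p, min g (2 * (d : Int) + 1))).sum := by
          rw [sum_odd, sum_swap_list]
  rw [hR, covsumB_eq_sum]
  congr 1
  refine congrArg List.sum (List.map_congr_left ?_)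
  intro g hg
  simpa using pergap g (gaps_pos hs g hg) p

-- the reference sum in closed form, at the least radius p reaching m cells
lemma bfsSum_closed (diffs : List Int) :
    ∀ (k r mN : ℕ), 0 < mN →
    ((mN : Int) ≤ covN diffs (r + k) - covN diffs r) →
    (∀ j, r ≤ j → j < r + k → covN diffs j - covN diffs r < (mN : Int)) →
    bfsSum diffs r mN = ssum diffs (r + k) - ssum diffs r
      - ((r : Int) + k) * (covN diffs (r + k) - covN diffs r - mN) := by
  intro k
  induction k with
  | zero =>
    intro r mN hm hub hmin
    simp only [Nat.add_zero] at hub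
    omega
  | succ k ih =>
    intro r mN hm hub hmin
    have hd2 := delta_ge_two diffs r
    rw [bfsSum, dif_neg (by omega : ¬ mN = 0)]
    by_cases hcase : (mN : Int) ≤ covN diffs (r + 1) - covN diffs r
    · rw [if_pos hcase]
      have hk0 : k = 0 := by
        by_contra hk
        have := hmin (r + 1) (by omega) (by omega)
        omega
      subst hk0
      have hss : ssum diffs (r + 1) = ssum diffs r + ((r : Int) + 1) * (covN diffs (r + 1) - covN diffs r) := rfl
      rw [hss]
      push_cast
      ring
    · rw [if_neg hcase]
      have hdlt : covN diffs (r + 1) - covN diffs r < (mN : Int) := by omega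
      set d := covN diffs (r + 1) - covN diffs r with hd
      have hidx : r + (k + 1) = (r + 1) + k := by omega
      have hcast : ((mN - d.toNat : ℕ) : Int) = (mN : Int) - d := by omega
      have hrec := ih (r + 1) (mN - d.toNat)
        (by omega)
        (by rw [← hidx]; omega)
        (by
          intro j hj1 hj2
          have := hmin j (by omega) (by omega)
          omega)
      rw [hrec]
      have hss : ssum diffs (r + 1) = ssum diffs r + ((r : Int) + 1) * d := rfl
      rw [← hidx] at *
      rw [hss, hcast]
      push_cast
      ring

-- the binary search finds the least radius with cov(r) - base ≥ m
lemma bsearch_spec (diffs : List Int) (m : Int) :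
    ∀ (fuel : ℕ) (lo hi : Int), 0 ≤ lo → lo ≤ hi → (hi - lo).toNat ≤ fuel →
    m ≤ covB diffs hi - covB diffs 0 →
    (∀ r', 0 ≤ r' → r' < lo → covB diffs r' - covB diffs 0 < m) →
    0 ≤ bsearchB diffs (covB diffs 0) m fuel lo hi ∧
    m ≤ covB diffs (bsearchB diffs (covB diffs 0) m fuel lo hi) - covB diffs 0 ∧
    (∀ r', 0 ≤ r' → r' < bsearchB diffs (covB diffs 0) m fuel lo hi →
      covB diffs r' - covB diffs 0 < m) := by
  intro fuel
  induction fuel with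
  | zero =>
    intro lo hi h0 hlh hgap hhi hmin
    have : lo = hi := by omega
    subst this
    exact ⟨h0, hhi, hmin⟩
  | succ fuel ih =>
    intro lo hi h0 hlh hgap hhi hmin
    by_cases hlt : lo < hi
    · have hmid := PySem.Int.floordiv_two_mid_bounds hlh
      have hmlt : PySem.Int.floordiv (lo + hi) 2 < hi := by
        rw [PySem.Int.floordiv_lt_iff_lt_mul (by omega)]
        omega
      rw [bsearchB, if_pos hlt]
      by_cases hcond : covB diffs (PySem.Int.floordiv (lo + hi) 2) - covB diffs 0 ≥ m
      · rw [if_pos hcond]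
        exact ih lo (PySem.Int.floordiv (lo + hi) 2) h0 hmid.1 (by omega) hcond hmin
      · rw [if_neg hcond]
        refine ih (PySem.Int.floordiv (lo + hi) 2 + 1) hi (by omega) (by omega) (by omega) hhi ?_
        intro r' hr0 hrlt
        by_cases hrlo : r' < lo
        · exact hmin r' hr0 hrlo
        · have : covB diffs r' ≤ covB diffs (PySem.Int.floordiv (lo + hi) 2) :=
            covB_mono diffs (by omega)
          omega
    · have : lo = hi := by omega
      subst this
      rw [bsearchB, if_neg hlt]
      exact ⟨h0, hhi, hmin⟩

lemma cov0_iff (arr : List Int) (z : Int) : covP arr 0 z ↔ z ∈ arr := by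
  constructor
  · rintro ⟨a, ha, h1, h2⟩
    have hz : z = a := by simp at h1 h2; omega
    rwa [hz]
  · intro hz
    exact ⟨z, hz, by simp, by simp⟩

-- ===== VERDICT (by name: the statement is the Claim_ definition above) =====
theorem solution_spec : Claim_equal_solution := by
  intro n m arr _ hpre
  unfold Spec_solution
  by_cases harr : arr = []
  · subst harr
    rfl
  · have hm0 : 0 ≤ m := by
      rcases hpre with h | h
      · exact h
      · exact absurd h harr
    by_cases hmz : m = 0
    · subst hmz
      have hA : solution n 0 arr = 0 := by
        unfold solution
        exact loopA_drain _ _ _ _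
      have hB : solution_alt n 0 arr = 0 := by
        unfold solution_alt
        simp
      rw [hA, hB]
    · have hmpos : 0 < m := lt_of_le_of_ne hm0 (Ne.symm hmz)
      have hA : solution n m arr = bfsSum (gapsB (sortedS arr)) 0 m.toNat := by
        unfold solution
        have ho := outer arr harr m.toNat 0 arr (arr.foldl (fun v a => v.insert a) ∅) m 0
          (arr.length + 2 * m.toNat + 1) rfl hmpos
          (fun c hc => (cov0_iff arr c).2 hc)
          (fun z h1 h2 => adj_base h1 h2)
          (fun z => by
            rw [mem_foldl_insert]
            simp only [Std.HashSet.not_mem_empty, false_or]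
            exact (cov0_iff arr z).symm)
          (by omega)
        rw [show (fun c : Int => (c, ((0 : ℕ) : Int))) = (fun a : Int => (a, (0 : Int))) by norm_num] at ho
        rw [ho, zero_add]
      have hsne := sortedS_ne_nil harr
      have hBs : (PySem.List.sorted (PySem.Set.ofList arr) (fun x => x) false).isEmpty = false := by
        simpa [List.isEmpty_iff, sortedS] using hsne
      have hmtn : ((m.toNat : ℕ) : Int) = m := by omega
      set ds := gapsB (sortedS arr) with hds
      set base := covB ds 0 with hbase
      have hub0 : m ≤ covB ds m - base := by
        have := covB_growth ds m.toNat
        unfold covN at this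
        rw [hmtn] at this
        omega
      obtain ⟨hr0, hrub, hrmin⟩ := bsearch_spec ds m m.toNat 0 m le_rfl hm0 (by omega) hub0
        (by intro r' h0 hlt; omega)
      set rho := bsearchB ds base m m.toNat 0 m with hrho
      have hrne : rho ≠ 0 := by
        intro h; rw [h] at hrub; omega
      have hrN : ((rho.toNat : ℕ) : Int) = rho := by omega
      have hc := bfsSum_closed ds rho.toNat 0 m.toNat (by omega)
        (by
          simp only [Nat.zero_add]
          unfold covN
          rw [hrN]
          simp only [Nat.cast_zero]
          rw [hmtn]
          exact hrub)
        (by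
          intro j hj1 hj2
          have hj := hrmin (j : Int) (by omega) (by omega)
          unfold covN
          simp only [Nat.cast_zero]
          rw [hmtn]
          exact hj)
      simp only [Nat.zero_add] at hc
      rw [hA, hc]
      simp only [solution_alt, hBs, Bool.false_or]
      rw [if_neg (by simp [hmz])]
      rw [show PySem.List.sorted (PySem.Set.ofList arr) (fun x => x) false = sortedS arr from rfl]
      rw [← hds, ← hbase, ← hrho, ← hrN]
      rw [ssum_eq]
      rw [show ssum ds 0 = 0 from rfl]
      rw [show covsumB ds ((rho.toNat : ℕ) : Int) = ∑ d ∈ Finset.range rho.toNat, covN ds d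
          from covsum_eq (sortedS arr) (sortedS_pairwise arr) rho.toNat]
      unfold covN
      simp only [Nat.cast_zero, Int.toNat_natCast]
      rw [← hbase, hmtn]
      ring
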